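-- pv_equiv track=rewrite | github.com/ShreySuri/Minesweeper | Minesweeper_2.py | validate
-- ===== SOURCE A (Python) =====
-- def validate(string):
--     check = False
--     for i in range (1, 9):
--         for j in range (1, 9):
--             value = "%s-%s" % (i, j)
--             if value == string:
--                 check = True
--             else:
--                 toggle = True
--
--     return(check)
-- ===== SOURCE B (Python) =====
-- def validate(string):
--     if not isinstance(string, str):
--         return False
--     return (len(string) == 3 and string[1] == '-'
--             and string[0] in '12345678' and string[2] in '12345678')
-- ===== Notes on version B (the rewrite author's own statement) =====
-- stated objective: simpler
-- what changed: Replaces the 64-candidate nested-loop search with a direct one-pass structural check of the string (length 3, middle '-', a digit 1-8 on each side).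
import Mathlib
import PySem

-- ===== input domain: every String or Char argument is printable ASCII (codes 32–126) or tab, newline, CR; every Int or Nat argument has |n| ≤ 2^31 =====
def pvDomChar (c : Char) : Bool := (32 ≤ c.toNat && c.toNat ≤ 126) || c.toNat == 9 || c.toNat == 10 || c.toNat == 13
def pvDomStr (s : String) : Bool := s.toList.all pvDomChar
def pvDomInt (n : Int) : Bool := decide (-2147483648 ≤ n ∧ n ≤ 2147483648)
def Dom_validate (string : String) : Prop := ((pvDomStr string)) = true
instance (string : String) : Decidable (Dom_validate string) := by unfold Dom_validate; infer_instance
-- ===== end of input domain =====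

-- B replaces A's 64-candidate nested-loop search by a direct structural check of the
-- string (length 3, '-' in the middle, a digit 1..8 on each side); objective: simpler.

-- ===== PORT A =====
-- Nested for-loops over range(1,9) x range(1,9) become nested foldl over pyRange; the flag
-- `check` is the accumulator. "%s-%s" % (i, j) is str(i) + "-" + str(j) (PySem.Int.toChars);
-- the comparison value == string is exact on .toList (String equality = char-list equality).
-- (The dead `toggle` assignment in the else branch has no effect and is not ported.)
def validate (string : String) : Bool :=
  (PySem.List.pyRange 1 9 1).foldl (fun check i =>
    (PySem.List.pyRange 1 9 1).foldl (fun check j =>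
      let value := PySem.Int.toChars i ++ ['-'] ++ PySem.Int.toChars j
      if value == string.toList then true else check) check) false

-- ===== PORT B =====
-- Source B: len(string) == 3 and string[1] == '-' and string[0] in '12345678' and string[2] in '12345678'.
-- Python's short-circuit `and` never indexes out of range; here pyGet? returns none (≠ some _)
-- in exactly those cases, which is the same result, so the port is total and exact.
-- `c in '12345678'` for the single character c is membership in its character list.
-- (Source B's isinstance guard is the type signature here: string : String.)
def validate_alt (string : String) : Bool :=
  PySem.Str.len string == 3 &&
  PySem.Str.pyGet? string 1 == some '-' &&
  (PySem.Str.pyGet? string 0).elim false (fun c => ['1','2','3','4','5','6','7','8'].contains c) &&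
  (PySem.Str.pyGet? string 2).elim false (fun c => ['1','2','3','4','5','6','7','8'].contains c)

-- ===== PRECONDITION & SPEC =====
def Spec_validate (string : String) (out : Bool) : Prop := out = validate_alt string
instance (string : String) (out : Bool) : Decidable (Spec_validate string out) := by unfold Spec_validate; infer_instance

-- ===== CLAIM (what is proved, stated in full; the proofs are below) =====
def Claim_equal_validate : Prop := ∀ (string : String), Dom_validate string → Spec_validate string (validate string)

-- ===== LEMMAS AND PROOFS =====

theorem foldl_ifset {α : Type} (p : α → Bool) (l : List α) (acc : Bool) :
    l.foldl (fun c v => if p v then true else c) acc = (acc || l.any p) := by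
  induction l generalizing acc with
  | nil => simp
  | cons x xs ih =>
    rw [List.foldl_cons, List.any_cons, ih]
    by_cases h : p x = true <;> simp [h]

theorem foldl_or {α : Type} (f : α → Bool) (l : List α) (acc : Bool) :
    l.foldl (fun c v => c || f v) acc = (acc || l.any f) := by
  induction l generalizing acc with
  | nil => simp
  | cons x xs ih =>
    rw [List.foldl_cons, List.any_cons, ih]
    cases acc <;> cases f x <;> simp

theorem validate_eq_any (string : String) :
    validate string =
      (PySem.List.pyRange 1 9 1).any (fun i => (PySem.List.pyRange 1 9 1).any
        (fun j => (PySem.Int.toChars i ++ ['-'] ++ PySem.Int.toChars j) == string.toList)) := by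
  unfold validate
  simp only [foldl_ifset, foldl_or, Bool.false_or]


set_option maxHeartbeats 2000000 in
theorem key (string : String) : validate string = validate_alt string := by
  rw [validate_eq_any]
  unfold validate_alt
  rw [show PySem.List.pyRange 1 9 1 = [1,2,3,4,5,6,7,8] from by decide]
  rw [show PySem.Str.pyGet? string 0 = string.toList[0]? from PySem.Str.pyGet?_natCast string 0,
      show PySem.Str.pyGet? string 1 = string.toList[1]? from PySem.Str.pyGet?_natCast string 1,
      show PySem.Str.pyGet? string 2 = string.toList[2]? from PySem.Str.pyGet?_natCast string 2,
      PySem.Str.len_eq]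
  simp only [List.any_cons, List.any_nil, Bool.or_false,
    show PySem.Int.toChars 1 = ['1'] from by decide, show PySem.Int.toChars 2 = ['2'] from by decide,
    show PySem.Int.toChars 3 = ['3'] from by decide, show PySem.Int.toChars 4 = ['4'] from by decide,
    show PySem.Int.toChars 5 = ['5'] from by decide, show PySem.Int.toChars 6 = ['6'] from by decide,
    show PySem.Int.toChars 7 = ['7'] from by decide, show PySem.Int.toChars 8 = ['8'] from by decide,
    List.cons_append, List.nil_append]
  rw [Bool.eq_iff_iff]
  rcases string.toList with _ | ⟨a, _ | ⟨b, _ | ⟨c, _ | ⟨d, t⟩⟩⟩⟩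
  · simp
  · simp [List.cons_beq_cons]
  · simp [List.cons_beq_cons]
  · simp [List.cons_beq_cons]
    constructor
    · rintro ((⟨rfl,rfl,rfl⟩|⟨rfl,rfl,rfl⟩|⟨rfl,rfl,rfl⟩|⟨rfl,rfl,rfl⟩|⟨rfl,rfl,rfl⟩|⟨rfl,rfl,rfl⟩|⟨rfl,rfl,rfl⟩|⟨rfl,rfl,rfl⟩)|(⟨rfl,rfl,rfl⟩|⟨rfl,rfl,rfl⟩|⟨rfl,rfl,rfl⟩|⟨rfl,rfl,rfl⟩|⟨rfl,rfl,rfl⟩|⟨rfl,rfl,rfl⟩|⟨rfl,rfl,rfl⟩|⟨rfl,rfl,rfl⟩)|(⟨rfl,rfl,rfl⟩|⟨rfl,rfl,rfl⟩|⟨rfl,rfl,rfl⟩|⟨rfl,rfl,rfl⟩|⟨rfl,rfl,rfl⟩|⟨rfl,rfl,rfl⟩|⟨rfl,rfl,rfl⟩|⟨rfl,rfl,rfl⟩)|(⟨rfl,rfl,rfl⟩|⟨rfl,rfl,rfl⟩|⟨rfl,rfl,rfl⟩|⟨rfl,rfl,rfl⟩|⟨rfl,rfl,rfl⟩|⟨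rfl,rfl,rfl⟩|⟨rfl,rfl,rfl⟩|⟨rfl,rfl,rfl⟩)|(⟨rfl,rfl,rfl⟩|⟨rfl,rfl,rfl⟩|⟨rfl,rfl,rfl⟩|⟨rfl,rfl,rfl⟩|⟨rfl,rfl,rfl⟩|⟨rfl,rfl,rfl⟩|⟨rfl,rfl,rfl⟩|⟨rfl,rfl,rfl⟩)|(⟨rfl,rfl,rfl⟩|⟨rfl,rfl,rfl⟩|⟨rfl,rfl,rfl⟩|⟨rfl,rfl,rfl⟩|⟨rfl,rfl,rfl⟩|⟨rfl,rfl,rfl⟩|⟨rfl,rfl,rfl⟩|⟨rfl,rfl,rfl⟩)|(⟨rfl,rfl,rfl⟩|⟨rfl,rfl,rfl⟩|⟨rfl,rfl,rfl⟩|⟨rfl,rfl,rfl⟩|⟨rfl,rfl,rfl⟩|⟨rfl,rfl,rfl⟩|⟨rfl,rfl,rfl⟩|⟨rfl,rfl,rfl⟩)|⟨rfl,rfl,rfl⟩|⟨rfl,rfl,rfl⟩|⟨rfl,rfl,rfl⟩|⟨rfl,rfl,rfl⟩|⟨rfl,rfl,rfl⟩|⟨rfl,rfl,rfl⟩|⟨rfl,rfl,rfl⟩|⟨rfl,rfl,rfl⟩)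 <;> simp
    · rintro ⟨⟨rfl, (rfl|rfl|rfl|rfl|rfl|rfl|rfl|rfl)⟩, (rfl|rfl|rfl|rfl|rfl|rfl|rfl|rfl)⟩ <;> simp
  · simp [List.cons_beq_cons]; intros; omega

-- ===== VERDICT (by name: the statement is the Claim_ definition above) =====
theorem validate_spec : Claim_equal_validate := by
  intro string _
  unfold Spec_validate
  exact key string
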